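-- pv_equiv track=rewrite | github.com/VictorVarges/restaurant_orders | src/analyze_log.py | days_never_visited
-- ===== SOURCE A (Python) =====
-- def days_never_visited(data, name):
--     days = set()
--     never_days = set()
--     for request in data:
--         days.add(request[2])
--         if request[0] == name:
--             never_days.add(request[2])
--     return (days.difference(never_days))
-- ===== SOURCE B (Python) =====
-- def days_never_visited(data, name):
--     idx = {}
--     for request in data:
--         idx.setdefault(request[2], set()).add(request[0])
--     return {day for day, names in idx.items() if name not in names}
-- ===== Notes on version B (the rewrite author's own statement) =====
-- stated objective: alternative
-- what changed: Replaces the two parallel flat sets (all days / days visited by the name) and the final set difference with a one-pass inverted index mapping each day to the set of names seen on it, deriving the answer by a per-day membership filter over the index items.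
import Mathlib
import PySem

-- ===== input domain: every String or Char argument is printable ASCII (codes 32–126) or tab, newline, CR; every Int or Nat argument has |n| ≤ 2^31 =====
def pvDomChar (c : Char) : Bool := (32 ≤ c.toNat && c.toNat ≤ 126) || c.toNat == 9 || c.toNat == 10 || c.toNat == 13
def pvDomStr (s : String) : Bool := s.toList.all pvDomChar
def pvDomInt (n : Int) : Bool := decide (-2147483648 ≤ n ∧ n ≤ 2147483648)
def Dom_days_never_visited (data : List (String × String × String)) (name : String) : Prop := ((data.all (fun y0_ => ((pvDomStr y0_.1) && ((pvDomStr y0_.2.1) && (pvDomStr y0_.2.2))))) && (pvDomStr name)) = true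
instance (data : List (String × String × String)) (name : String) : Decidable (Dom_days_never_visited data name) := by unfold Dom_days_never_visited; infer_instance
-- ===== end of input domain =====

-- B replaces A's two parallel flat sets and final set-difference with a one-pass
-- day -> visitor-set inverted index filtered by per-day membership (alternative, same cost).


-- ===== PORT A =====
def days_never_visited (data : List (String × String × String)) (name : String) : List String :=
  let st := data.foldl
    (fun (st : PySem.Set String × PySem.Set String) r =>
      (PySem.Set.add st.1 r.2.2,
       if r.1 == name then PySem.Set.add st.2 r.2.2 else st.2))
    (PySem.Set.empty, PySem.Set.empty)
  PySem.Set.diff st.1 st.2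

-- ===== PORT B =====
def days_never_visited_alt (data : List (String × String × String)) (name : String) : List String :=
  let idx := data.foldl
    (fun (d : PySem.Dict String (PySem.Set String)) r =>
      d.modify r.2.2 PySem.Set.empty (fun s => PySem.Set.add s r.1))
    PySem.Dict.empty
  PySem.Set.ofList ((idx.items.filter (fun kv => !(PySem.Set.contains kv.2 name))).map (·.1))

-- ===== PRECONDITION & SPEC =====
def Spec_days_never_visited (data : List (String × String × String)) (name : String) (out : List String) : Prop := out = days_never_visited_alt data name
instance (data : List (String × String × String)) (name : String) (out : List String) : Decidable (Spec_days_never_visited data name out) := by unfold Spec_days_never_visited; infer_instance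

-- ===== CLAIM (what is proved, stated in full; the proofs are below) =====
def Claim_equal_days_never_visited : Prop := ∀ (data : List (String × String × String)) (name : String), Dom_days_never_visited data name → Spec_days_never_visited data name (days_never_visited data name)

-- ===== LEMMAS AND PROOFS =====

-- A's paired fold splits into two independent folds.
theorem pvA_fold_split (data : List (String × String × String)) (name : String)
    (a b : PySem.Set String) :
    data.foldl
      (fun (st : PySem.Set String × PySem.Set String) r =>
        (PySem.Set.add st.1 r.2.2,
         if r.1 == name then PySem.Set.add st.2 r.2.2 else st.2)) (a, b)
    = (data.foldl (fun s r => PySem.Set.add s r.2.2) a,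
       data.foldl (fun s r => if r.1 == name then PySem.Set.add s r.2.2 else s) b) := by
  induction data generalizing a b with
  | nil => rfl
  | cons r rest ih => simp only [List.foldl_cons]; exact ih _ _

-- membership in A's never_days accumulator
theorem pvA_mem_never (name : String) (data : List (String × String × String))
    (b : PySem.Set String) (x : String) :
    x ∈ data.foldl (fun s r => if r.1 == name then PySem.Set.add s r.2.2 else s) b
      ↔ x ∈ b ∨ ∃ r ∈ data, r.1 = name ∧ r.2.2 = x := by
  induction data generalizing b with
  | nil => simp
  | cons r rest ih =>
    rw [List.foldl_cons, ih]
    by_cases h : r.1 = name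
    · rw [if_pos (by simp [h]), PySem.Set.mem_add]
      constructor
      · rintro (⟨h1 | h2⟩ | ⟨r', hr', h3, h4⟩)
        · exact Or.inl h1
        · exact Or.inr ⟨r, List.mem_cons_self, h, h2.symm⟩
        · exact Or.inr ⟨r', List.mem_cons_of_mem _ hr', h3, h4⟩
      · rintro (h1 | ⟨r', hr', h3, h4⟩)
        · exact Or.inl (Or.inl h1)
        · rcases List.mem_cons.mp hr' with rfl | hr''
          · exact Or.inl (Or.inr h4.symm)
          · exact Or.inr ⟨r', hr'', h3, h4⟩
    · rw [if_neg (by simp [h])]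
      constructor
      · rintro (h1 | ⟨r', hr', h3, h4⟩)
        · exact Or.inl h1
        · exact Or.inr ⟨r', List.mem_cons_of_mem _ hr', h3, h4⟩
      · rintro (h1 | ⟨r', hr', h3, h4⟩)
        · exact Or.inl h1
        · rcases List.mem_cons.mp hr' with rfl | hr''
          · exact absurd h3 h
          · exact Or.inr ⟨r', hr'', h3, h4⟩

-- a modify with the empty-set default adds its key to the key list
theorem pv_keys_modify_add (d : PySem.Dict String (PySem.Set String)) (k : String)
    (f : PySem.Set String → PySem.Set String) :
    (d.modify k PySem.Set.empty f).keys = PySem.Set.add d.keys k := by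
  simp only [PySem.Dict.keys_modify, PySem.Set.add_eq_ite]
  by_cases hk : k ∈ d.keys
  · rw [PySem.Dict.keys_insert_of_contains, if_pos hk]
    rw [PySem.Dict.contains_iff_mem_keys]; exact hk
  · rw [PySem.Dict.keys_insert_of_not_contains, if_neg hk]
    rw [← Bool.not_eq_true, PySem.Dict.contains_iff_mem_keys]; exact hk

-- keys of B's index fold
theorem pvB_keys (data : List (String × String × String))
    (d : PySem.Dict String (PySem.Set String)) :
    (data.foldl
      (fun (d : PySem.Dict String (PySem.Set String)) r =>
        d.modify r.2.2 PySem.Set.empty (fun s => PySem.Set.add s r.1)) d).keys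
    = PySem.Set.update d.keys (data.map (fun r => r.2.2)) := by
  induction data generalizing d with
  | nil => simp [PySem.Set.update_nil]
  | cons r rest ih =>
    rw [List.foldl_cons, ih, List.map_cons, PySem.Set.update_cons, pv_keys_modify_add]

-- membership of a visitor in B's per-day set
theorem pvB_mem_getD (data : List (String × String × String))
    (d : PySem.Dict String (PySem.Set String)) (k x : String) :
    x ∈ (data.foldl
          (fun (d : PySem.Dict String (PySem.Set String)) r =>
            d.modify r.2.2 PySem.Set.empty (fun s => PySem.Set.add s r.1)) d).getD k PySem.Set.empty
      ↔ x ∈ d.getD k PySem.Set.empty ∨ ∃ r ∈ data, r.2.2 = k ∧ r.1 = x := by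
  induction data generalizing d with
  | nil => simp
  | cons r rest ih =>
    rw [List.foldl_cons, ih, PySem.Dict.getD_modify]
    by_cases h : k = r.2.2
    · subst h
      rw [if_pos rfl, PySem.Set.mem_add]
      constructor
      · rintro (⟨h1 | h2⟩ | ⟨r', hr', h3, h4⟩)
        · exact Or.inl h1
        · exact Or.inr ⟨r, List.mem_cons_self, rfl, h2.symm⟩
        · exact Or.inr ⟨r', List.mem_cons_of_mem _ hr', h3, h4⟩
      · rintro (h1 | ⟨r', hr', h3, h4⟩)
        · exact Or.inl (Or.inl h1)
        · rcases List.mem_cons.mp hr' with rfl | hr''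
          · exact Or.inl (Or.inr h4.symm)
          · exact Or.inr ⟨r', hr'', h3, h4⟩
    · rw [if_neg h]
      constructor
      · rintro (h1 | ⟨r', hr', h3, h4⟩)
        · exact Or.inl h1
        · exact Or.inr ⟨r', List.mem_cons_of_mem _ hr', h3, h4⟩
      · rintro (h1 | ⟨r', hr', h3, h4⟩)
        · exact Or.inl h1
        · rcases List.mem_cons.mp hr' with rfl | hr''
          · exact absurd h3.symm h
          · exact Or.inr ⟨r', hr'', h3, h4⟩

theorem days_never_visited_eq (data : List (String × String × String)) (name : String) :
    days_never_visited data name = days_never_visited_alt data name := by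
  unfold days_never_visited days_never_visited_alt
  simp only []
  set idx := data.foldl
    (fun (d : PySem.Dict String (PySem.Set String)) r =>
      d.modify r.2.2 PySem.Set.empty (fun s => PySem.Set.add s r.1)) PySem.Dict.empty with hidx
  have hkeys : idx.keys = PySem.Set.ofList (data.map (fun r => r.2.2)) := by
    rw [hidx, pvB_keys]
    simp [PySem.Set.update_nil_left]
  have hnd : idx.keys.Nodup := by
    rw [hkeys]; exact PySem.Set.nodup_ofList _
  have hitems := PySem.Dict.items_eq_map_keys idx hnd PySem.Set.empty
  rw [pvA_fold_split, hitems, List.filter_map, List.map_map]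
  have hdays : data.foldl (fun s r => PySem.Set.add s r.2.2) PySem.Set.empty
      = PySem.Set.ofList (data.map (fun r => r.2.2)) := by
    rw [PySem.Set.ofList_eq_foldl (xs := data.map (fun r => r.2.2)), List.foldl_map]; rfl
  have hdiff : PySem.Set.diff
      (data.foldl (fun s r => PySem.Set.add s r.2.2) PySem.Set.empty)
      (data.foldl (fun s r => if r.1 == name then PySem.Set.add s r.2.2 else s) PySem.Set.empty)
      = (PySem.Set.ofList (data.map (fun r => r.2.2))).filter
          (fun k => !(PySem.Set.contains
            (data.foldl (fun s r => if r.1 == name then PySem.Set.add s r.2.2 else s) PySem.Set.empty) k)) := by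
    rw [hdays]; rfl
  rw [hdiff, hkeys]
  have hpred : ∀ k ∈ PySem.Set.ofList (data.map (fun r => r.2.2)),
      (!(PySem.Set.contains
          (data.foldl (fun s r => if r.1 == name then PySem.Set.add s r.2.2 else s) PySem.Set.empty) k))
      = ((fun kv : String × PySem.Set String => !(PySem.Set.contains kv.2 name)) ∘
          (fun k => (k, idx.getD k PySem.Set.empty))) k := by
    intro k _
    simp only [Function.comp]
    congr 1
    have h1 : PySem.Set.contains
        (data.foldl (fun s r => if r.1 == name then PySem.Set.add s r.2.2 else s) PySem.Set.empty) k = true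
        ↔ ∃ r ∈ data, r.1 = name ∧ r.2.2 = k := by
      rw [PySem.Set.contains_iff, pvA_mem_never]
      simp [PySem.Set.empty]
    have h2 : PySem.Set.contains (idx.getD k PySem.Set.empty) name = true
        ↔ ∃ r ∈ data, r.2.2 = k ∧ r.1 = name := by
      rw [PySem.Set.contains_iff, hidx, pvB_mem_getD]
      simp
    rw [Bool.eq_iff_iff, h1, h2]
    constructor
    · rintro ⟨r, hr, ha, hb⟩; exact ⟨r, hr, hb, ha⟩
    · rintro ⟨r, hr, ha, hb⟩; exact ⟨r, hr, hb, ha⟩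
  rw [List.filter_congr hpred]
  rw [show ((fun x : String × PySem.Set String => x.1) ∘
        (fun k => (k, idx.getD k PySem.Set.empty))) = id from rfl, List.map_id]
  exact (PySem.Set.ofList_eq_self_of_nodup _ (List.Nodup.filter _
    (PySem.Set.nodup_ofList (List.map (fun r => r.2.2) data)))).symm

-- ===== VERDICT (by name: the statement is the Claim_ definition above) =====
theorem days_never_visited_spec : Claim_equal_days_never_visited := by
  intro data name _
  unfold Spec_days_never_visited
  exact days_never_visited_eq data name
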